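-- pv_equiv track=rewrite | github.com/TheSleepyKing/UWCProject | tests.py | randomwalktest
-- ===== SOURCE A (Python) =====
-- def randomwalktest(seq):
--
--     positions = [0]
--     step = 0
--
--     for i in range( len(seq) ):
--         if seq[i] == '0':
--             step = -1
--         else:
--             step = 1
--
--         positions.append(positions[i] + step)
--
--     return (positions)
-- ===== SOURCE B (Python) =====
-- def randomwalktest(seq):
--     # Build the walk back-to-front: compute the final position as the total
--     # step sum, then traverse the bits in reverse, recording positions while
--     # undoing each step, and reverse the collected list at the end.
--     pos = sum(1 if c != '0' else -1 for c in seq)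
--     out = []
--     for c in reversed(seq):
--         out.append(pos)
--         pos -= 1 if c != '0' else -1
--     out.append(pos)
--     out.reverse()
--     return out
-- ===== Notes on version B (the rewrite author's own statement) =====
-- stated objective: alternative
-- what changed: Instead of a forward running-sum loop, B first computes the final position as the total step sum, then walks the string in reverse, emitting positions while subtracting each step, and reverses the collected list at the end (back-to-front construction).
import Mathlib
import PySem

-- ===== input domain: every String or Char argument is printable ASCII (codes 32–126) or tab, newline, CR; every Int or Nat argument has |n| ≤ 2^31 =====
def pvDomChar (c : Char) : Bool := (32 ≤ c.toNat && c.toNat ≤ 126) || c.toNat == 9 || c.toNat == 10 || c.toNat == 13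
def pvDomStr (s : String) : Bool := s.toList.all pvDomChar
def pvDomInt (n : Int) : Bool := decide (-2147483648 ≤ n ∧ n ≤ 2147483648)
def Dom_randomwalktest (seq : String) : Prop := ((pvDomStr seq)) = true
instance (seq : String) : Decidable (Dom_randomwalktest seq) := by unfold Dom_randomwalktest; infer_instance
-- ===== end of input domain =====

-- B builds the walk back-to-front: total step sum first, then a reverse
-- traversal subtracting steps, then one final reverse (alternative, same cost).

-- ===== PORT A =====
-- index loop: for i in range(len(seq)): step from seq[i]; append positions[i] + step
def randomwalktest (seq : String) : List Int :=
  (PySem.List.pyRange 0 (PySem.Str.len seq) 1).foldl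
    (fun positions i =>
      let step : Int := if PySem.Str.pyGet? seq i = some '0' then -1 else 1
      positions ++ [PySem.List.pyGetD positions i 0 + step])
    [0]

-- ===== PORT B =====
-- pos = sum(...); for c in reversed(seq): out.append(pos); pos -= step; append; reverse
def randomwalktest_alt (seq : String) : List Int :=
  let pos0 : Int := seq.toList.foldl (fun a c => a + (if c ≠ '0' then 1 else -1)) 0
  let st := seq.toList.reverse.foldl
    (fun (st : List Int × Int) c => (st.1 ++ [st.2], st.2 - (if c ≠ '0' then 1 else -1)))
    ([], pos0)
  (st.1 ++ [st.2]).reverse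

-- ===== PRECONDITION & SPEC =====
def Spec_randomwalktest (seq : String) (out : List Int) : Prop := out = randomwalktest_alt seq
instance (seq : String) (out : List Int) : Decidable (Spec_randomwalktest seq out) := by unfold Spec_randomwalktest; infer_instance

-- ===== CLAIM (what is proved, stated in full; the proofs are below) =====
def Claim_equal_randomwalktest : Prop := ∀ (seq : String), Dom_randomwalktest seq → Spec_randomwalktest seq (randomwalktest seq)

-- ===== LEMMAS AND PROOFS =====

/-- The tail of the walk starting at position `p` over the remaining bits. -/
def pvWalk (p : Int) : List Char → List Int
  | [] => []
  | c :: cs =>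
      let q := p + (if c = '0' then -1 else 1)
      q :: pvWalk q cs

/-- Total step sum of a bit list. -/
def pvS : List Char → Int
  | [] => 0
  | c :: cs => (if c = '0' then -1 else 1) + pvS cs

theorem pvWalk_cons (p : Int) (c : Char) (cs : List Char) :
    pvWalk p (c :: cs)
      = (p + (if c = '0' then -1 else 1)) :: pvWalk (p + (if c = '0' then -1 else 1)) cs := rfl

theorem step_eq (c : Char) : (if c ≠ '0' then (1 : Int) else -1) = (if c = '0' then -1 else 1) := by
  by_cases h : c = '0' <;> simp [h]

theorem getD_append_singleton (Q : List Int) (p : Int) :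
    (Q ++ [p]).getD Q.length 0 = p := by
  simp [List.getD]

-- A's index loop from a state of matching length equals appending the walk.
theorem lemA (seq : String) (suf pre : List Char) (hseq : seq.toList = pre ++ suf)
    (Q : List Int) (p : Int) (hQ : Q.length = pre.length) :
    (PySem.List.pyRange (pre.length : Int) ((pre.length : Int) + suf.length) 1).foldl
        (fun positions i =>
          let step : Int := if PySem.Str.pyGet? seq i = some '0' then -1 else 1
          positions ++ [PySem.List.pyGetD positions i 0 + step]) (Q ++ [p])
      = (Q ++ [p]) ++ pvWalk p suf := by
  induction suf generalizing pre Q p with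
  | nil =>
      simp [pvWalk, PySem.List.pyRange]
  | cons c cs ih =>
      have hlt : (pre.length : Int) < (pre.length : Int) + (c :: cs).length := by
        simp
      rw [PySem.List.pyRange_one_cons hlt]
      simp only [List.foldl_cons]
      have hget : PySem.Str.pyGet? seq (pre.length : Int) = some c := by
        rw [PySem.Str.pyGet?_natCast, hseq]
        simp
      have hgetD : PySem.List.pyGetD (Q ++ [p]) (pre.length : Int) 0 = p := by
        rw [PySem.List.pyGetD_natCast]
        rw [← hQ]
        exact getD_append_singleton Q p
      rw [hget, hgetD]
      have hseq' : seq.toList = (pre ++ [c]) ++ cs := by simpa using hseq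
      have hQ' : (Q ++ [p]).length = (pre ++ [c]).length := by simp [hQ]
      have := ih (pre ++ [c]) hseq' (Q ++ [p]) (p + if c = '0' then -1 else 1) hQ'
      have harith : ((pre ++ [c]).length : Int) = (pre.length : Int) + 1 := by simp
      rw [harith] at this
      have hlen : ((pre.length : Int) + 1) + (cs.length : Int)
          = (pre.length : Int) + ((c :: cs).length : Int) := by simp; ring
      rw [hlen] at this
      rw [pvWalk_cons]
      simp only [Option.some.injEq]
      simpa using this

-- B's sum fold computes a + pvS l.
theorem lemSum (l : List Char) (a : Int) :
    l.foldl (fun a c => a + (if c ≠ '0' then 1 else -1)) a = a + pvS l := by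
  induction l generalizing a with
  | nil => simp [pvS]
  | cons c cs ih =>
      rw [List.foldl_cons, ih, step_eq]
      simp only [pvS]
      ring

-- B's reverse fold, started at the walk's end position, accumulates the
-- reversed walk and ends at the start position.
theorem lemB (l : List Char) (acc : List Int) (q : Int) :
    l.reverse.foldl
        (fun (st : List Int × Int) c => (st.1 ++ [st.2], st.2 - (if c ≠ '0' then 1 else -1)))
        (acc, q + pvS l)
      = (acc ++ (pvWalk q l).reverse, q) := by
  induction l generalizing acc q with
  | nil => simp [pvS, pvWalk]
  | cons c cs ih =>
      have hfold : (c :: cs).reverse = cs.reverse ++ [c] := by simp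
      rw [hfold, List.foldl_append]
      have hq : q + pvS (c :: cs)
          = (q + (if c = '0' then -1 else 1)) + pvS cs := by
        simp only [pvS]; ring
      rw [hq, ih]
      simp only [List.foldl_cons, List.foldl_nil, step_eq, pvWalk_cons,
        List.reverse_cons, List.append_assoc, Prod.mk.injEq]
      exact ⟨trivial, by ring⟩

theorem portA_eq_walk (seq : String) : randomwalktest seq = 0 :: pvWalk 0 seq.toList := by
  have hA := lemA seq seq.toList [] (by simp) [] 0 (by simp)
  norm_num at hA
  unfold randomwalktest
  rw [PySem.Str.len_eq]
  norm_num
  exact hA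

theorem portB_eq_walk (seq : String) : randomwalktest_alt seq = 0 :: pvWalk 0 seq.toList := by
  unfold randomwalktest_alt
  simp only [lemSum, zero_add]
  have hB := lemB seq.toList [] 0
  rw [zero_add] at hB
  rw [hB]
  simp

-- ===== VERDICT (by name: the statement is the Claim_ definition above) =====
theorem randomwalktest_spec : Claim_equal_randomwalktest := by
  intro seq _
  unfold Spec_randomwalktest
  rw [portA_eq_walk, portB_eq_walk]
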